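-- pv_equiv track=rewrite | github.com/mgbarsky/botany_citizen | data_prep/generate_categorical_table.py | trim_table
-- ===== SOURCE A (Python) =====
-- NUMERIC_COL_IDS = [5, 7, 9, 15, 19, 24, 25, 26, 33, 39, 40, 57, 60, 66, 77, 78, 79, 86, 89, 95, 103, 109, 115, 120, 121,
--                    126, 127, 140, 143, 158, 172, 174, 175, 176, 179, 180, 182, 183, 185, 189, 190, 191, 193, 194, 195]
--
-- def trim_table(header, data_rows):
--     cat_header = []
--     cat_rows = [[] for i in range(len(data_rows))]
--
--     for col_id in (range(len(header))):
--         if col_id in NUMERIC_COL_IDS: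
--             continue
--
--         cat_header.append(header[col_id])
--         for row_index in range(len(data_rows)):
--             cat_rows[row_index].append(data_rows[row_index][col_id])
--
--     return cat_header, cat_rows
-- ===== SOURCE B (Python) =====
-- NUMERIC_COL_IDS = [5, 7, 9, 15, 19, 24, 25, 26, 33, 39, 40, 57, 60, 66, 77, 78, 79, 86, 89, 95, 103, 109, 115, 120, 121,
--                    126, 127, 140, 143, 158, 172, 174, 175, 176, 179, 180, 182, 183, 185, 189, 190, 191, 193, 194, 195]
--
--
-- def trim_table(header, data_rows):
--     # Cut every row into the maximal runs of consecutive kept columns that lie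
--     # between the dropped (numeric) column ids, and concatenate the slices:
--     # no per-column membership test or per-cell append at all.
--     n = len(header)
--     cuts = [c for c in NUMERIC_COL_IDS if c < n]
--     bounds = []
--     start = 0
--     for c in cuts:
--         bounds.append((start, c))
--         start = c + 1
--     bounds.append((start, n))
--
--     def select(seq):
--         out = []
--         for a, b in bounds:
--             out.extend(seq[a:b])
--         return out
--
--     return select(header), [select(row) for row in data_rows]
-- ===== Notes on version B (the rewrite author's own statement) =====
-- stated objective: faster
-- what changed: Instead of testing every column id for membership in NUMERIC_COL_IDS and appending cell by cell, B precomputes the (start, stop) bounds of the maximal runs of kept columns between the dropped ids once and builds header and each row by concatenating those slices.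
import Mathlib
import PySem

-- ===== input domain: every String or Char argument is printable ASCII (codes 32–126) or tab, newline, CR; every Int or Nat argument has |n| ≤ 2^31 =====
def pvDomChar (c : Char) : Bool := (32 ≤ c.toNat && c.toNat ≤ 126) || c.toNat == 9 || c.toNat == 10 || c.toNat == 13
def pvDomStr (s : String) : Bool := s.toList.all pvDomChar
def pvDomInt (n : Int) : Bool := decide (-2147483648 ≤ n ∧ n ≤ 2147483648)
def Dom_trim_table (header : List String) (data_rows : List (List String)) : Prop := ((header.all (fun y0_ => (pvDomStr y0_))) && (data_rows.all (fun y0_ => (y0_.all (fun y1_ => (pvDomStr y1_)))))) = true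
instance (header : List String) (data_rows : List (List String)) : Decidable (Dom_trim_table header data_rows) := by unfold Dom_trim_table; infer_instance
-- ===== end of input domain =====

-- B replaces A's per-column membership test and per-cell appends by precomputed slice bounds
-- of the kept-column runs, concatenating row slices (objective: faster, constant factor).

-- ===== PORT A =====
def numericColIds : List Int := [5, 7, 9, 15, 19, 24, 25, 26, 33, 39, 40, 57, 60, 66, 77, 78, 79, 86, 89, 95, 103, 109, 115, 120, 121, 126, 127, 140, 143, 158, 172, 174, 175, 176, 179, 180, 182, 183, 185, 189, 190, 191, 193, 194, 195]

-- inner loop 'for row_index in range(len(data_rows)): cat_rows[row_index].append(data_rows[row_index][col_id])'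
-- transcribed as a zipWith of the accumulator rows with data_rows: the two lists always have equal
-- length (cat_rows starts as one empty list per data row and zipWith preserves length), so pairing
-- by position is exactly the Python index loop.
def trim_table (header : List String) (data_rows : List (List String)) : List String × List (List String) :=
  (PySem.List.pyRange 0 (header.length : Int) 1).foldl
    (fun st col =>
      if numericColIds.contains col then st
      else (st.1 ++ [PySem.List.pyGetD header col ""],
            List.zipWith (fun acc row => acc ++ [PySem.List.pyGetD row col ""]) st.2 data_rows))
    ([], data_rows.map (fun _ => []))

-- ===== PORT B =====
-- 'out.extend(seq[a:b])' is the foldl appending PySem.List.slice pieces; the bounds-building loop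
-- is the foldl over cuts carrying (bounds, start).
def trim_table_alt (header : List String) (data_rows : List (List String)) : List String × List (List String) :=
  let n : Int := (header.length : Int)
  let cuts := numericColIds.filter (fun c => c < n)
  let p := cuts.foldl (fun st c => (st.1 ++ [(st.2, c)], c + 1)) (([] : List (Int × Int)), (0 : Int))
  let bounds := p.1 ++ [(p.2, n)]
  let select := fun (seq : List String) =>
    bounds.foldl (fun out ab => out ++ PySem.List.slice seq (some ab.1) (some ab.2)) ([] : List String)
  (select header, data_rows.map select)

-- ===== PRECONDITION & SPEC =====
-- Pre_ excludes exactly the ragged inputs on which A raises IndexError: some data row is too short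
-- for some kept (non-numeric) column index of the header.
def Pre_trim_table (header : List String) (data_rows : List (List String)) : Prop :=
  ∀ row ∈ data_rows, ∀ c ∈ List.range header.length,
    numericColIds.contains ((c : Nat) : Int) = false → c < row.length
instance (header : List String) (data_rows : List (List String)) : Decidable (Pre_trim_table header data_rows) := by unfold Pre_trim_table; infer_instance

def pvWitness_trim_table : List String × List (List String) := (["name", "colour"], [["oak", "green"], ["ash", "grey"]])

def Spec_trim_table (header : List String) (data_rows : List (List String)) (out : List String × List (List String)) : Prop := out = trim_table_alt header data_rows
instance (header : List String) (data_rows : List (List String)) (out : List String × List (List String)) : Decidable (Spec_trim_table header data_rows out) := by unfold Spec_trim_table; infer_instance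

-- ===== CLAIM (what is proved, stated in full; the proofs are below) =====
def Claim_equal_trim_table : Prop := ∀ (header : List String) (data_rows : List (List String)), Dom_trim_table header data_rows → Pre_trim_table header data_rows → Spec_trim_table header data_rows (trim_table header data_rows)


-- ===== LEMMAS AND PROOFS =====

-- Bool 'contains = false' means non-membership
theorem contains_eq_false {l : List Int} {x : Int} : l.contains x = false ↔ x ∉ l := by
  constructor
  · intro h hm
    rw [List.contains_iff_mem.mpr hm] at h
    cases h
  · intro h
    cases hc : l.contains x with
    | false => rfl
    | true => exact absurd (List.contains_iff_mem.mp hc) h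

-- === A-side normal form ===

-- zipWith that ignores its second list is the identity when the lengths agree
theorem zipWith_fst_of_length_eq {α β : Type} (xs : List α) (ys : List β)
    (h : xs.length = ys.length) : List.zipWith (fun a _ => a) xs ys = xs := by
  induction xs generalizing ys with
  | nil => simp
  | cons x xs ih =>
    cases ys with
    | nil => simp at h
    | cons y ys => simpa using ih ys (by simpa using h)

-- fusing two zipWiths over the same second list
theorem zipWith_zipWith_same {α β γ δ : Type} (F : γ → β → δ) (G : α → β → γ)
    (xs : List α) (ys : List β) :
    List.zipWith F (List.zipWith G xs ys) ys = List.zipWith (fun a b => F (G a b) b) xs ys := by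
  induction xs generalizing ys with
  | nil => simp
  | cons x xs ih =>
    cases ys with
    | nil => simp
    | cons y ys => simpa using ih ys

-- zipWith against a constant map of the same list is a map
theorem zipWith_map_const {α β : Type} (f : α → α → β) (c : α) (xs : List α) :
    List.zipWith (fun a b => f a b) (xs.map (fun _ => c)) xs = xs.map (fun x => f c x) := by
  induction xs with
  | nil => rfl
  | cons x xs ih => simpa using ih

-- invariant of A's column-major fold
theorem foldA_invariant (header : List String) (data_rows : List (List String))
    (cols : List Int) (h0 : List String) (rs0 : List (List String))
    (hlen : rs0.length = data_rows.length) :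
    cols.foldl
      (fun st col =>
        if numericColIds.contains col then st
        else (st.1 ++ [PySem.List.pyGetD header col ""],
              List.zipWith (fun acc row => acc ++ [PySem.List.pyGetD row col ""]) st.2 data_rows))
      (h0, rs0)
    = (h0 ++ (cols.filter (fun c => !numericColIds.contains c)).map
          (fun c => PySem.List.pyGetD header c ""),
       List.zipWith
          (fun acc row => acc ++ (cols.filter (fun c => !numericColIds.contains c)).map
            (fun c => PySem.List.pyGetD row c "")) rs0 data_rows) := by
  induction cols generalizing h0 rs0 with
  | nil =>
    simp only [List.foldl_nil, List.filter_nil, List.map_nil, List.append_nil]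
    rw [zipWith_fst_of_length_eq rs0 data_rows hlen]
  | cons c cols ih =>
    by_cases h : numericColIds.contains c
    · simp only [List.foldl_cons, h, if_true, List.filter_cons, Bool.not_true]
      simpa using ih h0 rs0 hlen
    · simp only [List.foldl_cons, h, if_false, List.filter_cons, Bool.not_false,
        Bool.false_eq_true]
      rw [ih _ _ (by simp [hlen, List.length_zipWith])]
      rw [zipWith_zipWith_same]
      simp

-- A computes: kept columns of the header, and for each row its kept cells (pyGetD form)
theorem trimA_eq (header : List String) (data_rows : List (List String)) :
    trim_table header data_rows
    = (((PySem.List.pyRange 0 (header.length : Int) 1).filter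
          (fun c => !numericColIds.contains c)).map (fun c => PySem.List.pyGetD header c ""),
       data_rows.map (fun row =>
        ((PySem.List.pyRange 0 (header.length : Int) 1).filter
          (fun c => !numericColIds.contains c)).map (fun c => PySem.List.pyGetD row c ""))) := by
  unfold trim_table
  rw [foldA_invariant header data_rows _ [] _ (by simp)]
  rw [zipWith_map_const (fun acc row =>
      acc ++ ((PySem.List.pyRange 0 (header.length : Int) 1).filter
        (fun c => !numericColIds.contains c)).map (fun c => PySem.List.pyGetD row c "")) []]
  simp

-- === B-side: segments ===

-- the (start, cut) pairs produced by the bounds-building loop, as a recursion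
def segsOf : Int → List Int → List (Int × Int)
  | _, [] => []
  | start, c :: cs => (start, c) :: segsOf (c + 1) cs

def finalStart : Int → List Int → Int
  | start, [] => start
  | _, c :: cs => finalStart (c + 1) cs

theorem foldl_bounds (cuts : List Int) (acc : List (Int × Int)) (start : Int) :
    cuts.foldl (fun st c => (st.1 ++ [(st.2, c)], c + 1)) (acc, start)
    = (acc ++ segsOf start cuts, finalStart start cuts) := by
  induction cuts generalizing acc start with
  | nil => simp [segsOf, finalStart]
  | cons c cs ih => simp [segsOf, finalStart, ih]

-- a slice with in-range natural bounds is the map of pyGetD over the index range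
theorem slice_eq_map_pyRange (xs : List String) (a b : Int) (ha : 0 ≤ a) (hb : 0 ≤ b)
    (hblen : b ≤ (xs.length : Int)) :
    PySem.List.slice xs (some a) (some b)
    = (PySem.List.pyRange a b 1).map (fun c => PySem.List.pyGetD xs c "") := by
  by_cases hba : b ≤ a
  · rw [PySem.List.slice_toNat xs ha hb, PySem.List.pyRange_one_eq_nil hba]
    simp [Nat.sub_eq_zero_of_le (by omega : b.toNat ≤ a.toNat)]
  · have hab : a < b := by omega
    have hdrop := PySem.List.map_pyGetD_pyRange xs ("") ha
    simp only [PySem.List.len_eq] at hdrop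
    rw [PySem.List.pyRange_one_append a b (xs.length : Int) (le_of_lt hab) hblen] at hdrop
    rw [List.map_append] at hdrop
    rw [PySem.List.slice_toNat xs ha hb]
    have hlen : ((PySem.List.pyRange a b 1).map (fun c => PySem.List.pyGetD xs c "")).length
        = b.toNat - a.toNat := by
      simp [PySem.List.length_pyRange_one]; omega
    calc (xs.drop a.toNat).take (b.toNat - a.toNat)
        = (((PySem.List.pyRange a b 1).map (fun c => PySem.List.pyGetD xs c ""))
            ++ ((PySem.List.pyRange b (xs.length : Int) 1).map
                 (fun c => PySem.List.pyGetD xs c ""))).take (b.toNat - a.toNat) := by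
          rw [hdrop]
      _ = _ := by rw [List.take_append_of_le_length (by omega), List.take_of_length_le (by omega)]

-- === the key lemma: concatenated segment slices = filtered kept columns ===
theorem select_eq (seq : List String) (n : Int) (hn : 0 ≤ n) :
    ∀ (cuts : List Int) (start : Int),
    cuts.Pairwise (· < ·) →
    (∀ x ∈ cuts, start ≤ x ∧ x < n) →
    0 ≤ start →
    (∀ c : Int, start ≤ c → c < n → cuts.contains c = false → c < (seq.length : Int)) →
    (segsOf start cuts ++ [(finalStart start cuts, n)]).flatMap
        (fun ab => PySem.List.slice seq (some ab.1) (some ab.2))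
    = ((PySem.List.pyRange start n 1).filter (fun x => !cuts.contains x)).map
        (fun c => PySem.List.pyGetD seq c "") := by
  intro cuts
  induction cuts with
  | nil =>
    intro start _ _ hstart hkept
    simp only [segsOf, finalStart, List.nil_append, List.flatMap_cons, List.flatMap_nil,
      List.append_nil]
    have hfilter : (PySem.List.pyRange start n 1).filter (fun x => !([] : List Int).contains x)
        = PySem.List.pyRange start n 1 := by simp
    rw [hfilter]
    by_cases hns : n ≤ start
    · rw [PySem.List.pyRange_one_eq_nil hns, PySem.List.slice_toNat seq hstart hn]
      simp [Nat.sub_eq_zero_of_le (by omega : n.toNat ≤ start.toNat)]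
    · have hlen : n ≤ (seq.length : Int) := by
        have := hkept (n - 1) (by omega) (by omega) (by simp)
        omega
      exact slice_eq_map_pyRange seq start n hstart hn hlen
  | cons c cs ih =>
    intro start hsorted hbound hstart hkept
    have hc := hbound c (List.mem_cons_self ..)
    have hcs_gt : ∀ x ∈ cs, c < x := by
      intro x hx; exact (List.pairwise_cons.mp hsorted).1 x hx
    -- the slice [start, c): all its indices are kept w.r.t. c :: cs
    have hseg : ∀ x : Int, start ≤ x → x < c → (c :: cs).contains x = false := by
      intro x h1 h2
      apply contains_eq_false.mpr
      simp only [List.mem_cons, not_or]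
      exact ⟨by omega, fun hx => by have := hcs_gt x hx; omega⟩
    have hslice : PySem.List.slice seq (some start) (some c)
        = (PySem.List.pyRange start c 1).map (fun x => PySem.List.pyGetD seq x "") := by
      by_cases hcs' : c ≤ start
      · rw [PySem.List.pyRange_one_eq_nil hcs',
          PySem.List.slice_toNat seq hstart (by omega)]
        simp [Nat.sub_eq_zero_of_le (by omega : c.toNat ≤ start.toNat)]
      · have hlen : c ≤ (seq.length : Int) := by
          have := hkept (c - 1) (by omega) (by omega) (hseg (c - 1) (by omega) (by omega))
          omega
        exact slice_eq_map_pyRange seq start c hstart (by omega) hlen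
    -- split the full range at c and c+1
    have hsplit : PySem.List.pyRange start n 1
        = PySem.List.pyRange start c 1 ++ (c :: PySem.List.pyRange (c + 1) n 1) := by
      rw [PySem.List.pyRange_one_append start c n hc.1 (by omega),
        PySem.List.pyRange_one_cons hc.2]
    have hfilter1 : (PySem.List.pyRange start c 1).filter (fun x => !(c :: cs).contains x)
        = PySem.List.pyRange start c 1 := by
      apply List.filter_eq_self.mpr
      intro x hx
      have hm := (PySem.List.mem_pyRange_one).mp hx
      rw [hseg x hm.1 hm.2]
      rfl
    have hfilter2 : (PySem.List.pyRange (c + 1) n 1).filter (fun x => !(c :: cs).contains x)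
        = (PySem.List.pyRange (c + 1) n 1).filter (fun x => !cs.contains x) := by
      apply List.filter_congr
      intro x hx
      have h1 := (PySem.List.mem_pyRange_one).mp hx
      have h2 : (x == c) = false := by simp; omega
      simp only [List.contains_cons, h2, Bool.false_or]
    have hrec := ih (c + 1) (List.pairwise_cons.mp hsorted).2
      (fun x hx => ⟨by have := hcs_gt x hx; omega, (hbound x (List.mem_cons_of_mem _ hx)).2⟩)
      (by omega)
      (fun x h1 h2 h3 => hkept x (by omega) h2 (contains_eq_false.mpr (by
        simp only [List.mem_cons, not_or]
        exact ⟨by omega, contains_eq_false.mp h3⟩)))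
    simp only [segsOf, finalStart, List.cons_append, List.flatMap_cons]
    rw [hrec, hslice, hsplit, List.filter_append, hfilter1, List.filter_cons_of_neg (by simp),
      hfilter2, List.map_append]

-- ragged inputs excluded by Pre_, phrased over Int columns
theorem pre_int (header : List String) (data_rows : List (List String))
    (hpre : Pre_trim_table header data_rows) (row : List String) (hrow : row ∈ data_rows) :
    ∀ c : Int, 0 ≤ c → c < (header.length : Int) →
      numericColIds.contains c = false → c < (row.length : Int) := by
  intro c h0 hlt hkept
  have := hpre row hrow c.toNat (List.mem_range.mpr (by omega))
    (by rwa [Int.toNat_of_nonneg h0])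
  omega

-- cuts facts about the literal id list
theorem numeric_sorted : numericColIds.Pairwise (· < ·) := by decide
theorem numeric_nonneg : ∀ x ∈ numericColIds, (0 : Int) ≤ x := by decide

-- the select of B over one sequence equals the kept-column map, under the row-length condition
theorem selectB_eq (header : List String) (seq : List String)
    (hkept : ∀ c : Int, 0 ≤ c → c < (header.length : Int) →
      numericColIds.contains c = false → c < (seq.length : Int)) :
    (((numericColIds.filter (fun c => c < (header.length : Int))).foldl
        (fun st c => (st.1 ++ [(st.2, c)], c + 1)) (([] : List (Int × Int)), (0 : Int))).1
      ++ [(((numericColIds.filter (fun c => c < (header.length : Int))).foldl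
        (fun st c => (st.1 ++ [(st.2, c)], c + 1)) (([] : List (Int × Int)), (0 : Int))).2,
        (header.length : Int))]).foldl
      (fun out ab => out ++ PySem.List.slice seq (some ab.1) (some ab.2)) ([] : List String)
    = ((PySem.List.pyRange 0 (header.length : Int) 1).filter
        (fun c => !numericColIds.contains c)).map (fun c => PySem.List.pyGetD seq c "") := by
  set n : Int := (header.length : Int) with hn
  set cuts := numericColIds.filter (fun c => c < n) with hcuts
  rw [foldl_bounds, PySem.List.foldl_append_eq_flatMap]
  simp only [List.nil_append]
  have hcontains : ∀ x : Int, x < n → cuts.contains x = numericColIds.contains x := by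
    intro x hx
    by_cases hm : x ∈ numericColIds
    · have h1 : x ∈ cuts := List.mem_filter.mpr ⟨hm, by simpa using hx⟩
      rw [List.contains_iff_mem.mpr h1, List.contains_iff_mem.mpr hm]
    · have h1 : x ∉ cuts := fun h => hm (List.mem_of_mem_filter h)
      rw [contains_eq_false.mpr h1, contains_eq_false.mpr hm]
  rw [select_eq seq n (by positivity) cuts 0
    (numeric_sorted.filter _)
    (fun x hx => ⟨numeric_nonneg x (List.mem_of_mem_filter hx),
      by simpa using (List.mem_filter.mp hx).2⟩)
    le_rfl
    (fun c h0 h1 h2 => hkept c h0 h1 (by rw [← hcontains c h1]; exact h2))]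
  congr 1
  apply List.filter_congr
  intro x hx
  have hm := (PySem.List.mem_pyRange_one).mp hx
  rw [hcontains x hm.2]

theorem trim_table_eq (header : List String) (data_rows : List (List String))
    (hpre : Pre_trim_table header data_rows) :
    trim_table header data_rows = trim_table_alt header data_rows := by
  rw [trimA_eq]
  unfold trim_table_alt
  simp only [Prod.mk.injEq]
  refine ⟨?_, ?_⟩
  · exact (selectB_eq header header (fun c _ h1 _ => h1)).symm
  · apply List.map_congr_left
    intro row hrow
    exact (selectB_eq header row (pre_int header data_rows hpre row hrow)).symm

-- ===== VERDICT (by name: the statement is the Claim_ definition above) =====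
theorem trim_table_spec : Claim_equal_trim_table := by
  intro header data_rows _ hpre
  exact trim_table_eq header data_rows hpre
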